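-- pv_equiv track=rewrite | github.com/florianblaser/routing | src/routing.py | find_last_nodes_per_day
-- ===== SOURCE A (Python) =====
-- def find_last_nodes_per_day(trips):
--     for trip, nodes in trips.items():
--         # Check if the trip spans multiple days by counting the numbers in the curly brackets
--         if len(trip.split('{')[1].split('}')[0].split(',')) > 1:
--             # Initialize tracking variables
--             current_day = None
--             last_node = None
--             day_nodes = []
--
--             for node_id, time_stamp in nodes:
--                 # Extract day information from the timestamp
--                 day = time_stamp.split(' ')[-1]
--
--                 # If we are still on the same day, update the last node
--                 if day == current_day:
--                     last_node = node_id
--                 else: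
--                     # If the day changes and it's not the first day, record the last node of the previous day
--                     if current_day is not None:
--                         day_nodes.append(last_node)
--                     # Update the current day and reset the last node
--                     current_day = day
--                     last_node = node_id
--
--             # Append the last node of the last day
--             if last_node != 0:
--                 day_nodes.append(last_node)
--
--             # Store the list of last nodes for each day in the result dictionary
--             return day_nodes
-- ===== SOURCE B (Python) =====
-- def find_last_nodes_per_day(trips):
--     # first trip whose {...} label lists more than one day
--     nodes = next((ns for trip, ns in trips.items()
--                   if len(trip.split('{')[1].split('}')[0].split(',')) > 1), None)
--     if nodes is None:
--         return None
--     # staged passes: extract days, mark day-boundary positions by comparing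
--     # each day with the next one, then select the node ids at boundaries
--     days = [ts.split(' ')[-1] for _, ts in nodes]
--     keep = [a != b for a, b in zip(days, days[1:])] + [True]
--     result = [nid for (nid, _), k in zip(nodes, keep) if k]
--     # the original suppresses the final day's node when it is 0
--     if result and result[-1] == 0:
--         result.pop()
--     return result
-- ===== Notes on version B (the rewrite author's own statement) =====
-- stated objective: alternative
-- what changed: Replaces A's streaming current_day/last_node state machine by staged passes: find the first multi-day trip, extract the list of days, mark day-boundary positions by zipping the day list with its own tail, select node ids at boundaries by a zip-filter, and trim a trailing zero.
-- outside the precondition, e.g. on find_last_nodes_per_day({'t{1,2}': []}): A returns [None], B returns []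
import Mathlib
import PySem

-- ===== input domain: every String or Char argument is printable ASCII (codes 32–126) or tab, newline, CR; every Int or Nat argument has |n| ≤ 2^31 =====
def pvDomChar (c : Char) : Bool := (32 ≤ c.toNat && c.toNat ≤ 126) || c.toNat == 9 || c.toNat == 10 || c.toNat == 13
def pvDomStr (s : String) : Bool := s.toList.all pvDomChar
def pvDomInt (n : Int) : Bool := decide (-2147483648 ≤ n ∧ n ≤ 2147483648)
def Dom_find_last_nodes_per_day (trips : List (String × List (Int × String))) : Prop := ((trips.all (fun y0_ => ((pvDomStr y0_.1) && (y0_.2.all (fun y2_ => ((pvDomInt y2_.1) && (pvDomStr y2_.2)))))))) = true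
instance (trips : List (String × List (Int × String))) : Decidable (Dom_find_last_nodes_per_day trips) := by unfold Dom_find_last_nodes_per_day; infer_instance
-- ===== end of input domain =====

-- B replaces A's streaming current_day/last_node state machine by staged passes:
-- day extraction, boundary marks from zipping the day list with its tail, a zip-filter
-- selecting node ids at boundaries, and one trailing-zero trim; same O(n) cost.

-- shared helpers: the label test and the day extraction (identical string code in both Pythons)
-- s.split(sep) for a nonempty literal sep; Str.split? is none only for sep = ""
def pvSplit (s sep : String) : List String := (PySem.Str.split? s sep).getD []

-- the [1] raises IndexError when the label has no '{'; those inputs are outside Pre_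
def pvMulti (label : String) : Bool :=
  (pvSplit (((pvSplit ((pvSplit label "{")[1]?.getD "") "}")[0]?).getD "") ",").length > 1

-- time_stamp.split(' ')[-1]; split never returns an empty list, so the getD "" never fires
def pvDay (ts : String) : String := ((pvSplit ts " ").getLast?).getD ""

-- ===== PORT A =====
-- A's inner loop; last_node : Option Int mirrors Python's None sentinel; the `.getD 0`
-- only fires where Python would append None (empty nodes), which Pre_ excludes.
def pvA_loop : List (Int × String) → Option String → Option Int → List Int → List Int
  | [], _, last_node, day_nodes =>
      if last_node ≠ some 0 then day_nodes ++ [last_node.getD 0] else day_nodes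
  | (node_id, time_stamp) :: rest, current_day, last_node, day_nodes =>
      let day := pvDay time_stamp
      if some day = current_day then
        pvA_loop rest current_day (some node_id) day_nodes
      else
        pvA_loop rest (some day) (some node_id)
          (if current_day ≠ none then day_nodes ++ [last_node.getD 0] else day_nodes)

def find_last_nodes_per_day (trips : List (String × List (Int × String))) : Option (List Int) :=
  match trips with
  | [] => none
  | (trip, nodes) :: rest =>
      if pvMulti trip then some (pvA_loop nodes none none []) else find_last_nodes_per_day rest

-- ===== PORT B =====
-- days, keep (boundary marks) and result, as the three comprehensions of Source B
def pvB_core (nodes : List (Int × String)) : List Int :=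
  let days := nodes.map (fun nt => pvDay nt.2)
  let keep := (days.zip days.tail).map (fun p => decide (p.1 ≠ p.2)) ++ [true]
  ((nodes.zip keep).filter (fun p => p.2)).map (fun p => p.1.1)

-- `if result and result[-1] == 0: result.pop()`
def pvB_trim (result : List Int) : List Int :=
  match result.getLast? with
  | some x => if x = 0 then result.dropLast else result
  | none => result

def find_last_nodes_per_day_alt (trips : List (String × List (Int × String))) : Option (List Int) :=
  match trips.find? (fun t => pvMulti t.1) with
  | none => none
  | some (_, nodes) => some (pvB_trim (pvB_core nodes))

-- ===== PRECONDITION & SPEC =====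
-- Pre_ excludes (i) inputs where A raises IndexError: a label without an opening brace scanned
-- before the first multi-day label; (ii) a first multi-day trip with an empty node list, where A
-- returns [None] — not a list of ints, so unmatchable in Option (List Int).
def Pre_find_last_nodes_per_day (trips : List (String × List (Int × String))) : Prop :=
  (∀ t ∈ trips.takeWhile (fun t => !pvMulti t.1), PySem.Str.isIn "{" t.1 = true) ∧
  (∀ t ∈ (trips.find? (fun t => pvMulti t.1)).toList, t.2 ≠ [])
instance (trips : List (String × List (Int × String))) : Decidable (Pre_find_last_nodes_per_day trips) := by unfold Pre_find_last_nodes_per_day; infer_instance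

def pvWitness_find_last_nodes_per_day : (List (String × List (Int × String))) :=
  [("t{1,2}", [(5, "a d1"), (6, "b d1"), (7, "c d2")])]

def Spec_find_last_nodes_per_day (trips : List (String × List (Int × String))) (out : Option (List Int)) : Prop := out = find_last_nodes_per_day_alt trips
instance (trips : List (String × List (Int × String))) (out : Option (List Int)) : Decidable (Spec_find_last_nodes_per_day trips out) := by unfold Spec_find_last_nodes_per_day; infer_instance

-- ===== CLAIM =====
def Claim_equal_find_last_nodes_per_day : Prop := ∀ (trips : List (String × List (Int × String))), Dom_find_last_nodes_per_day trips → Pre_find_last_nodes_per_day trips → Spec_find_last_nodes_per_day trips (find_last_nodes_per_day trips)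

-- ===== LEMMAS AND PROOFS =====

-- proof-side helper: look-ahead selection over (node id, day) pairs — keeps an id when
-- the next pair's day differs, and always the last id
def pvSelD : List (Int × String) → List Int
  | [] => []
  | [(n, _)] => [n]
  | (n, d) :: (m, e) :: r => if d ≠ e then n :: pvSelD ((m, e) :: r) else pvSelD ((m, e) :: r)

-- Source B's staged zip construction computes exactly the look-ahead selection
lemma pvB_core_eq_selD : ∀ (nodes : List (Int × String)),
    pvB_core nodes = pvSelD (nodes.map (fun nt => (nt.1, pvDay nt.2))) := by
  intro nodes
  induction nodes with
  | nil => rfl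
  | cons x rest ih =>
      match rest with
      | [] => simp [pvB_core, pvSelD]
      | y :: r =>
          by_cases h : pvDay x.2 = pvDay y.2 <;>
            simp_all [pvB_core, pvSelD]

-- A's streaming loop from a mid-run state (current day d, pending last node l) computes
-- the trim of acc followed by the look-ahead selection starting at (l, d)
lemma pvA_loop_eq_selD : ∀ (nodes : List (Int × String)) (d : String) (l : Int)
    (acc : List Int),
    pvA_loop nodes (some d) (some l) acc =
      pvB_trim (acc ++ pvSelD ((l, d) :: nodes.map (fun nt => (nt.1, pvDay nt.2)))) := by
  intro nodes
  induction nodes with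
  | nil =>
      intro d l acc
      simp only [pvA_loop, List.map_nil, pvSelD, pvB_trim, List.getLast?_concat]
      by_cases h : l = 0 <;> simp [h]
  | cons nt rest ih =>
      intro d l acc
      obtain ⟨node_id, time_stamp⟩ := nt
      simp only [pvA_loop, List.map_cons]
      by_cases hd : pvDay time_stamp = d
      · rw [if_pos (by rw [hd]), ih d node_id acc]
        simp [pvSelD, hd]
      · rw [if_neg (by simpa using hd), if_pos (by simp)]
        simp only [Option.getD_some]
        rw [ih (pvDay time_stamp) node_id (acc ++ [l])]
        have : ¬ d = pvDay time_stamp := fun h => hd h.symm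
        simp [pvSelD, this]

-- the whole inner computation agrees on a nonempty node list
lemma pvA_loop_eq_core (nodes : List (Int × String)) (h : nodes ≠ []) :
    pvA_loop nodes none none [] = pvB_trim (pvB_core nodes) := by
  match nodes with
  | (node_id, time_stamp) :: rest =>
    have h1 : pvA_loop ((node_id, time_stamp) :: rest) none none [] =
        pvA_loop rest (some (pvDay time_stamp)) (some node_id) [] := by
      simp [pvA_loop]
    rw [h1, pvA_loop_eq_selD, pvB_core_eq_selD]
    rfl

-- the outer scans agree given nonempty nodes at the first multi-day trip
lemma pv_outer_eq : ∀ (trips : List (String × List (Int × String))),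
    (∀ t ∈ (trips.find? (fun t => pvMulti t.1)).toList, t.2 ≠ []) →
    find_last_nodes_per_day trips = find_last_nodes_per_day_alt trips := by
  intro trips
  induction trips with
  | nil => intro _; simp [find_last_nodes_per_day, find_last_nodes_per_day_alt]
  | cons t rest ih =>
      intro hne
      obtain ⟨trip, nodes⟩ := t
      by_cases hm : pvMulti trip
      · have hfind : ((trip, nodes) :: rest).find? (fun t => pvMulti t.1) = some (trip, nodes) := by
          simp [hm]
        have hnodes : nodes ≠ [] := by
          have := hne (trip, nodes); rw [hfind] at this; simpa using this
        simp only [find_last_nodes_per_day, find_last_nodes_per_day_alt, hfind, hm, if_pos]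
        rw [pvA_loop_eq_core nodes hnodes]
      · have hfind : ((trip, nodes) :: rest).find? (fun t => pvMulti t.1) =
            rest.find? (fun t => pvMulti t.1) := by
          simp [hm]
        have hrest := ih (by intro t ht; exact hne t (by rw [hfind]; exact ht))
        simp only [find_last_nodes_per_day, find_last_nodes_per_day_alt, hm, if_neg,
          Bool.false_eq_true, not_false_iff, hfind] at hrest ⊢
        exact hrest

-- ===== VERDICT =====
theorem find_last_nodes_per_day_spec : Claim_equal_find_last_nodes_per_day := by
  intro trips _ hpre
  exact pv_outer_eq trips hpre.2
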